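-- pv_equiv track=rewrite | github.com/spiralMonster/FakeNewsDetector | SemanticAndStructuredAnalyzer/StructuredAnalyzer/feature_extractor.py | check_capitalization_after_full_stop
-- ===== SOURCE A (Python) =====
-- def check_capitalization_after_full_stop(text: str):
--     num_errors = 0
--     list_sent = text.split(".")
--     list_sent = [sent for sent in list_sent if sent != '']
--     list_sent = [sent.strip() for sent in list_sent]
--
--     for sent in list_sent:
--         if sent != "":
--             first_letter = sent[0]
--             if first_letter.isalpha():
--                 if not first_letter.isupper():
--                     num_errors += 1
--
--     return num_errors
-- ===== SOURCE B (Python) =====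
-- def check_capitalization_after_full_stop(text: str):
--     count = 0
--     expect = True  # waiting for the first non-space char of the current sentence
--     for ch in text:
--         if ch == '.':
--             expect = True
--         elif ch.isspace():
--             pass
--         elif expect:
--             if ch.isalpha() and not ch.isupper():
--                 count += 1
--             expect = False
--     return count
-- ===== Notes on version B (the rewrite author's own statement) =====
-- stated objective: alternative
-- what changed: Replaces the split-into-segments, filter, strip and count passes by a single left-to-right character scan that keeps an expect-sentence-start flag, building no intermediate lists.
import Mathlib
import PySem

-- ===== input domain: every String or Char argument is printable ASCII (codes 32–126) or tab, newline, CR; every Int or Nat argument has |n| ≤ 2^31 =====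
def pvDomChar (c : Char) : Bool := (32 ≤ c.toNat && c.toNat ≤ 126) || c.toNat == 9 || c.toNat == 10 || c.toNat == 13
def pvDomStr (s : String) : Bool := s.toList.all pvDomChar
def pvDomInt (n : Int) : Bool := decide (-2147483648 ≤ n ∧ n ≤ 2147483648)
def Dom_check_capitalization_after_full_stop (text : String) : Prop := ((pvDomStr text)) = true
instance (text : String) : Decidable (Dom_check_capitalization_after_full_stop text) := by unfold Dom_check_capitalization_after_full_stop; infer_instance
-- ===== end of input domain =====

-- B replaces A's split/filter/strip list passes by one character scan with an
-- expect-sentence-start flag (objective: alternative single-pass algorithm, no intermediate lists).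

-- ===== PORT A =====
-- loop body of A's for-loop (named helper; body is the literal transliteration)
def pvStepA (num_errors : Int) (sent : List Char) : Int :=
  if sent ≠ ([] : List Char) then
    -- sent[0]: index 0 is in range because of the guard sent ≠ []
    let first_letter := PySem.List.pyGetD sent 0 ' '
    if PySem.Chars.isalpha first_letter then
      if ¬ PySem.Chars.isupper first_letter then num_errors + 1 else num_errors
    else num_errors
  else num_errors

def check_capitalization_after_full_stop (text : String) : Int :=
  let list_sent := PySem.Chars.splitOn text.toList ['.']
  let list_sent := list_sent.filter (fun sent => sent ≠ ([] : List Char))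
  let list_sent := list_sent.map (fun sent => PySem.Chars.strip sent)
  list_sent.foldl pvStepA 0

-- ===== PORT B =====
-- loop body of B's scan: state (count, expect)
def pvStepB (st : Int × Bool) (ch : Char) : Int × Bool :=
  if ch = '.' then (st.1, true)
  else if PySem.Chars.isspace ch then st
  else if st.2 then
    (if PySem.Chars.isalpha ch && ¬ PySem.Chars.isupper ch then st.1 + 1 else st.1, false)
  else st

def check_capitalization_after_full_stop_alt (text : String) : Int :=
  (text.toList.foldl pvStepB (0, true)).1

-- ===== PRECONDITION & SPEC =====
def Spec_check_capitalization_after_full_stop (text : String) (out : Int) : Prop := out = check_capitalization_after_full_stop_alt text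
instance (text : String) (out : Int) : Decidable (Spec_check_capitalization_after_full_stop text out) := by unfold Spec_check_capitalization_after_full_stop; infer_instance

-- ===== CLAIM (what is proved, stated in full; the proofs are below) =====
def Claim_equal_check_capitalization_after_full_stop : Prop := ∀ (text : String), Dom_check_capitalization_after_full_stop text → Spec_check_capitalization_after_full_stop text (check_capitalization_after_full_stop text)

-- ===== LEMMAS AND PROOFS =====

-- first letter counts as an error
def pvBad (c : Char) : Bool := PySem.Chars.isalpha c && ¬ PySem.Chars.isupper c

-- contribution of one stripped segment
def pvF (s : List Char) : Int :=
  if s = ([] : List Char) then 0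
  else if pvBad (PySem.List.pyGetD s 0 ' ') then 1 else 0

-- contribution of one raw (unstripped) segment
def pvG (s : List Char) : Int :=
  match s.dropWhile PySem.Chars.isspace with
  | [] => 0
  | c :: _ => if pvBad c then 1 else 0

-- ideal recursive single-char split on '.'
def pvSplit : List Char → List (List Char)
  | [] => [[]]
  | c :: cs =>
    if c = '.' then [] :: pvSplit cs
    else match pvSplit cs with
      | [] => [[c]]          -- unreachable: pvSplit is never empty
      | h :: t => (c :: h) :: t

-- B's scanner as a structural recursion
def pvScan : List Char → Bool → Int
  | [], _ => 0
  | c :: cs, e =>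
    if c = '.' then pvScan cs true
    else if PySem.Chars.isspace c then pvScan cs e
    else if e then (if pvBad c then 1 else 0) + pvScan cs false
    else pvScan cs false

lemma pvSplit_ne_nil (cs : List Char) : pvSplit cs ≠ [] := by
  cases cs with
  | nil => simp [pvSplit]
  | cons c cs =>
    simp only [pvSplit]
    split
    · simp
    · split <;> simp

lemma pvGo_eq (fuel : Nat) (l cur : List Char) (acc : List (List Char))
    (h : l.length ≤ fuel) :
    PySem.Chars.splitOn.go ['.'] fuel l cur acc =
      acc.reverse ++ (match pvSplit l with
        | [] => [cur.reverse]
        | h :: t => (cur.reverse ++ h) :: t) := by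
  induction fuel generalizing l cur acc with
  | zero =>
    have : l = [] := List.length_eq_zero_iff.mp (Nat.le_zero.mp h)
    subst this
    simp [PySem.Chars.splitOn.go, pvSplit]
  | succ fuel ih =>
    cases l with
    | nil => simp [PySem.Chars.splitOn.go, pvSplit]
    | cons c rest =>
      have hr : rest.length ≤ fuel := by simpa using h
      by_cases hc : c = '.'
      · subst hc
        rw [show PySem.Chars.splitOn.go ['.'] (fuel+1) ('.' :: rest) cur acc =
            PySem.Chars.splitOn.go ['.'] fuel (List.drop 1 ('.' :: rest)) [] (cur.reverse :: acc) by
          simp [PySem.Chars.splitOn.go, List.isPrefixOf]]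
        rw [List.drop_succ_cons, List.drop_zero, ih _ _ _ hr]
        have hne := pvSplit_ne_nil rest
        simp only [pvSplit]
        cases hs : pvSplit rest with
        | nil => exact absurd hs hne
        | cons h t => simp
      · have hc' : ¬ ('.' = c) := fun h => hc h.symm
        rw [show PySem.Chars.splitOn.go ['.'] (fuel+1) (c :: rest) cur acc =
            PySem.Chars.splitOn.go ['.'] fuel rest (c :: cur) acc by
          simp [PySem.Chars.splitOn.go, List.isPrefixOf, hc']]
        rw [ih _ _ _ hr]
        have hne := pvSplit_ne_nil rest
        simp only [pvSplit, if_neg hc]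
        cases hs : pvSplit rest with
        | nil => exact absurd hs hne
        | cons h t => simp

lemma pvSplitOn_eq (cs : List Char) : PySem.Chars.splitOn cs ['.'] = pvSplit cs := by
  have := pvGo_eq (cs.length + 1) cs [] [] (by omega)
  rw [PySem.Chars.splitOn, this]
  have hne := pvSplit_ne_nil cs
  cases hs : pvSplit cs with
  | nil => exact absurd hs hne
  | cons h t => simp

lemma pvStepA_eq (n : Int) (s : List Char) : pvStepA n s = n + pvF s := by
  unfold pvStepA pvF pvBad
  by_cases hs : s = ([] : List Char)
  · simp [hs]
  · simp only [hs, if_neg, ne_eq, not_false_eq_true, if_pos]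
    by_cases h1 : PySem.Chars.isalpha (PySem.List.pyGetD s 0 ' ') = true <;>
      by_cases h2 : PySem.Chars.isupper (PySem.List.pyGetD s 0 ' ') = true <;>
        simp [h1, h2]

lemma pvFoldA (l : List (List Char)) (n : Int) :
    l.foldl pvStepA n = n + (l.map pvF).sum := by
  induction l generalizing n with
  | nil => simp
  | cons s l ih => rw [List.foldl_cons, pvStepA_eq, ih]; simp; ring

lemma pvF_strip (s : List Char) : pvF (PySem.Chars.strip s) = pvG s := by
  unfold pvG
  cases hd : s.dropWhile PySem.Chars.isspace with
  | nil =>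
    have : PySem.Chars.strip s = [] := by
      simp [PySem.Chars.strip, PySem.Chars.lstrip, PySem.Chars.rstrip, hd]
    simp [pvF, this]
  | cons c t =>
    have hc : ¬ PySem.Chars.isspace c := by
      have := List.head_dropWhile_not (p := PySem.Chars.isspace) (l := s)
      rw [hd] at this
      simpa using this (by simp)
    have hstrip : PySem.Chars.strip s =
        (List.dropWhile PySem.Chars.isspace ((c :: t).reverse)).reverse := by
      simp [PySem.Chars.strip, PySem.Chars.lstrip, PySem.Chars.rstrip, hd]
    rw [List.reverse_cons, List.dropWhile_append] at hstrip
    by_cases he : (List.dropWhile PySem.Chars.isspace t.reverse).isEmpty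
    · rw [if_pos he] at hstrip
      rw [List.dropWhile_cons] at hstrip
      rw [if_neg (by simp [hc])] at hstrip
      rw [hstrip]
      simp [pvF, PySem.List.pyGetD]
    · rw [if_neg he] at hstrip
      rw [List.reverse_append, List.reverse_singleton, List.singleton_append] at hstrip
      rw [hstrip]
      simp [pvF, PySem.List.pyGetD]

lemma pvFilterStrip (segs : List (List Char)) :
    (((segs.filter (fun s => s ≠ ([] : List Char))).map (fun sent => PySem.Chars.strip sent)).map pvF).sum
      = (segs.map pvG).sum := by
  induction segs with
  | nil => simp
  | cons s segs ih =>
    by_cases hs : s = ([] : List Char)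
    · subst hs
      have hg : pvG ([] : List Char) = 0 := by simp [pvG]
      rw [List.filter_cons, if_neg (by simp), ih, List.map_cons, List.sum_cons, hg, zero_add]
    · rw [List.filter_cons]
      rw [if_pos (by simpa using hs)]
      rw [List.map_cons, List.map_cons, List.sum_cons, List.map_cons, List.sum_cons, ih, pvF_strip]

lemma pvScan_split (cs : List Char) :
    pvScan cs true = ((pvSplit cs).map pvG).sum ∧
    pvScan cs false = ((pvSplit cs).tail.map pvG).sum := by
  induction cs with
  | nil => simp [pvScan, pvSplit, pvG]
  | cons c cs ih =>
    by_cases hc : c = '.'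
    · subst hc
      simp [pvScan, pvSplit, pvG, ih.1]
    · have hne := pvSplit_ne_nil cs
      cases hs : pvSplit cs with
      | nil => exact absurd hs hne
      | cons h t =>
        by_cases hsp : PySem.Chars.isspace c = true
        · have hg : pvG (c :: h) = pvG h := by
            simp [pvG, hsp]
          have h1 := hs ▸ ih.1
          have h2 := hs ▸ ih.2
          constructor <;> simp [pvScan, pvSplit, hc, hsp, hs, hg, h1, h2]
        · have hg : pvG (c :: h) = if pvBad c then 1 else 0 := by
            simp [pvG, hsp]
          have h2 := hs ▸ ih.2
          constructor <;> simp [pvScan, pvSplit, hc, hsp, hs, hg, h2]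

lemma pvFoldB (cs : List Char) (n : Int) (e : Bool) :
    (cs.foldl pvStepB (n, e)).1 = n + pvScan cs e := by
  induction cs generalizing n e with
  | nil => simp [pvScan]
  | cons c cs ih =>
    rw [List.foldl_cons]
    by_cases hc : c = '.'
    · subst hc
      rw [show pvStepB (n, e) '.' = (n, true) by simp [pvStepB]]
      rw [ih]
      simp [pvScan]
    · by_cases hsp : PySem.Chars.isspace c = true
      · rw [show pvStepB (n, e) c = (n, e) by simp [pvStepB, hc, hsp]]
        rw [ih]
        rw [show pvScan (c :: cs) e = pvScan cs e by
          rw [pvScan, if_neg hc, if_pos hsp]]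
      · cases e with
        | true =>
          rw [show pvStepB (n, true) c = (if pvBad c then n + 1 else n, false) by
            simp [pvStepB, pvBad, hc, hsp]]
          rw [ih]
          rw [show pvScan (c :: cs) true = (if pvBad c then 1 else 0) + pvScan cs false by
            rw [pvScan, if_neg hc]; simp [hsp]]
          by_cases hb : pvBad c = true <;> simp [hb] <;> ring
        | false =>
          rw [show pvStepB (n, false) c = (n, false) by simp [pvStepB, hc, hsp]]
          rw [ih]
          rw [show pvScan (c :: cs) false = pvScan cs false by
            rw [pvScan, if_neg hc]; simp [hsp]]

-- ===== VERDICT (by name: the statement is the Claim_ definition above) =====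
theorem check_capitalization_after_full_stop_spec : Claim_equal_check_capitalization_after_full_stop := by
  intro text _
  unfold Spec_check_capitalization_after_full_stop
  unfold check_capitalization_after_full_stop check_capitalization_after_full_stop_alt
  rw [pvFoldB, pvFoldA, pvSplitOn_eq, pvFilterStrip, (pvScan_split text.toList).1]
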